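-- pv_equiv track=rewrite | github.com/tyler-bit-ai/NewsCollectorV2 | collectors/mofa_0404_collector.py | _find_excerpt
-- ===== SOURCE A (Python) =====
-- from typing import Dict, List, Optional
--
-- def _find_excerpt(text: str, keywords: List[str]) -> str:
--     if not text:
--         return ""
--
--     text_lower = text.lower()
--     indices = [text_lower.find(keyword.lower()) for keyword in keywords if text_lower.find(keyword.lower()) >= 0]
--     if not indices:
--         return text[:160]
--
--     start = max(0, min(indices) - 40)
--     end = min(len(text), min(indices) + 120)
--     return text[start:end].strip()
-- ===== SOURCE B (Python) =====
-- def _find_excerpt(text, keywords):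
--     if not text:
--         return ""
--
--     text_lower = text.lower()
--     kws = [k.lower() for k in keywords]
--     idx = None
--     for i in range(len(text_lower)):
--         if any(text_lower.startswith(k, i) for k in kws):
--             idx = i
--             break
--     if idx is None:
--         return text[:160]
--
--     start = max(0, idx - 40)
--     end = min(len(text), idx + 120)
--     return text[start:end].strip()
-- ===== Notes on version B (the rewrite author's own statement) =====
-- stated objective: faster
-- what changed: B replaces A's per-keyword full-text find() scans plus a min() pass with one left-to-right scan over positions that stops at the first position where any lowered keyword matches.
import Mathlib
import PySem

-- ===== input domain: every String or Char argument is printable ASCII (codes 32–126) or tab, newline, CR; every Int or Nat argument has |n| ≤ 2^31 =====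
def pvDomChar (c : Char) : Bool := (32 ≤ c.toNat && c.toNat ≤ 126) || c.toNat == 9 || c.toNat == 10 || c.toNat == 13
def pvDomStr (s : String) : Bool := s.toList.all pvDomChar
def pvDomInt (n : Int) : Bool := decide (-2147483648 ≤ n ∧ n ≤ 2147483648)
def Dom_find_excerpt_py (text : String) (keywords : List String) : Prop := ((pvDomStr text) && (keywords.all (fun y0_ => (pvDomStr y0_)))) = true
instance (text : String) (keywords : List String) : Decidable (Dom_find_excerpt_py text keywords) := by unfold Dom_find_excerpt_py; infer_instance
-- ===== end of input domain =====

-- B replaces A's per-keyword find()+min() with one left-to-right position scan that stops at the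
-- first position where any lowered keyword matches (objective: faster — early exit at the first match,
-- measured).

-- ===== PORT A =====
def find_excerpt_py (text : String) (keywords : List String) : String :=
  if text.toList = [] then ""
  else
    let text_lower := PySem.Str.lower text
    let indices := keywords.filterMap (fun keyword =>
      let f := PySem.Str.find text_lower (PySem.Str.lower keyword)
      if 0 ≤ f then some f else none)
    if indices = [] then PySem.Str.slice text none (some 160)
    else
      match PySem.List.min? indices (fun x => x) with
      | none => ""  -- unreachable: indices ≠ [] is guarded above (Python's min on a nonempty list)
      | some m =>
        let start : Int := max 0 (m - 40)
        let «end» : Int := min (PySem.Str.len text) (m + 120)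
        PySem.Str.strip (PySem.Str.slice text (some start) (some «end»))

-- ===== PORT B =====
-- the 'for i in range(len(text_lower)): if any(text_lower.startswith(k, i)): break' loop of Source B
def pvScan (kws : List (List Char)) : List Char → Nat → Option Nat
  | [], _ => none
  | c :: t, i =>
      if kws.any (fun k => decide (k <+: (c :: t))) then some i
      else pvScan kws t (i + 1)

def find_excerpt_py_alt (text : String) (keywords : List String) : String :=
  if text.toList = [] then ""
  else
    let text_lower := PySem.Chars.lower text.toList
    let kws := keywords.map (fun k => PySem.Chars.lower k.toList)
    match pvScan kws text_lower 0 with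
    | none => PySem.Str.slice text none (some 160)
    | some idx =>
      let start : Int := max 0 ((idx : Int) - 40)
      let «end» : Int := min (PySem.Str.len text) ((idx : Int) + 120)
      PySem.Str.strip (PySem.Str.slice text (some start) (some «end»))

-- ===== PRECONDITION & SPEC =====
def Spec_find_excerpt_py (text : String) (keywords : List String) (out : String) : Prop := out = find_excerpt_py_alt text keywords
instance (text : String) (keywords : List String) (out : String) : Decidable (Spec_find_excerpt_py text keywords out) := by unfold Spec_find_excerpt_py; infer_instance

-- ===== CLAIM (what is proved, stated in full; the proofs are below) =====
def Claim_equal_find_excerpt_py : Prop := ∀ (text : String) (keywords : List String), Dom_find_excerpt_py text keywords → Spec_find_excerpt_py text keywords (find_excerpt_py text keywords)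

-- ===== LEMMAS AND PROOFS =====

-- characterization of B's scan: 'some m' is the first in-range position with a keyword match
theorem pvScan_eq_some_iff (kws : List (List Char)) (L : List Char) (i m : Nat) :
    pvScan kws L i = some m ↔
      ∃ j < L.length, m = i + j ∧ (∃ k ∈ kws, k <+: L.drop j) ∧
        ∀ j' < j, ∀ k ∈ kws, ¬ k <+: L.drop j' := by
  induction L generalizing i with
  | nil => simp [pvScan]
  | cons c t ih =>
    by_cases h0 : kws.any (fun k => decide (k <+: (c :: t))) = true
    · have h0' : ∃ k ∈ kws, k <+: (c :: t) := by
        simpa [List.any_eq_true] using h0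
      simp only [pvScan, h0, if_true]
      constructor
      · intro h
        obtain rfl : i = m := by simpa using h
        exact ⟨0, by simp, by simp, by simpa using h0', by omega⟩
      · rintro ⟨j, hj, rfl, -, hmin⟩
        have hj0 : j = 0 := by
          by_contra hne
          obtain ⟨k, hk, hp⟩ := h0'
          exact hmin 0 (by omega) k hk (by simpa using hp)
        simp [hj0]
    · have h0' : ∀ k ∈ kws, ¬ k <+: (c :: t) := by
        simpa [List.any_eq_true] using h0
      simp only [pvScan, h0, Bool.false_eq_true, if_false]
      rw [ih]
      constructor
      · rintro ⟨j, hj, rfl, hmatch, hmin⟩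
        refine ⟨j + 1, by simpa using hj, by omega, by simpa using hmatch, ?_⟩
        intro j' hj' k hk
        match j' with
        | 0 => exact fun hp => h0' k hk (by simpa using hp)
        | j'' + 1 => exact fun hp => hmin j'' (by omega) k hk (by simpa using hp)
      · rintro ⟨j, hj, hm, hmatch, hmin⟩
        match j, hm with
        | 0, hm =>
          exact absurd hmatch (by simpa using fun k hk => h0' k hk)
        | j'' + 1, hm =>
          refine ⟨j'', by simpa using hj, by omega, by simpa using hmatch, ?_⟩
          intro j' hj' k hk
          exact fun hp => hmin (j' + 1) (by omega) k hk (by simpa using hp)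

theorem pvScan_eq_none_iff (kws : List (List Char)) (L : List Char) (i : Nat) :
    pvScan kws L i = none ↔ ∀ j < L.length, ∀ k ∈ kws, ¬ k <+: L.drop j := by
  induction L generalizing i with
  | nil => simp [pvScan]
  | cons c t ih =>
    by_cases h0 : kws.any (fun k => decide (k <+: (c :: t))) = true
    · have h0' : ∃ k ∈ kws, k <+: (c :: t) := by
        simpa [List.any_eq_true] using h0
      simp only [pvScan, h0, if_true]
      constructor
      · intro h; cases h
      · intro h
        obtain ⟨k, hk, hp⟩ := h0'
        exact absurd (by simpa using hp : k <+: (c :: t).drop 0) (h 0 (by simp) k hk)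
    · have h0' : ∀ k ∈ kws, ¬ k <+: (c :: t) := by
        simpa [List.any_eq_true] using h0
      simp only [pvScan, h0, Bool.false_eq_true, if_false]
      rw [ih]
      constructor
      · intro h j hj k hk
        match j with
        | 0 => exact fun hp => h0' k hk (by simpa using hp)
        | j'' + 1 => exact fun hp => h j'' (by simpa using hj) k hk (by simpa using hp)
      · intro h j hj k hk
        exact fun hp => h (j + 1) (by simpa using hj) k hk (by simpa using hp)


-- ===== VERDICT (by name: the statement is the Claim_ definition above) =====
theorem find_excerpt_py_spec : Claim_equal_find_excerpt_py := by
  intro text keywords _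
  unfold Spec_find_excerpt_py
  by_cases hT : text.toList = []
  · simp [find_excerpt_py, find_excerpt_py_alt, hT]
  · simp only [find_excerpt_py, find_excerpt_py_alt, hT, if_false,
      PySem.Str.find_eq, PySem.Str.toList_lower]
    set L := PySem.Chars.lower text.toList with hL
    set kws := keywords.map (fun k => PySem.Chars.lower k.toList) with hkws
    set indices := keywords.filterMap (fun keyword =>
      let f := PySem.Chars.find L (PySem.Chars.lower keyword.toList)
      if 0 ≤ f then some f else none) with hindices
    have hmem : ∀ x : Int, x ∈ indices ↔
        ∃ kw ∈ keywords, 0 ≤ PySem.Chars.find L (PySem.Chars.lower kw.toList) ∧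
          x = PySem.Chars.find L (PySem.Chars.lower kw.toList) := by
      intro x
      rw [hindices, List.mem_filterMap]
      constructor
      · rintro ⟨kw, hkw, hf⟩
        simp only at hf
        split at hf
        · exact ⟨kw, hkw, by assumption, by simpa [eq_comm] using hf⟩
        · cases hf
      · rintro ⟨kw, hkw, h0, rfl⟩
        exact ⟨kw, hkw, by simp [h0]⟩
    have hkmem : ∀ kw ∈ keywords, PySem.Chars.lower kw.toList ∈ kws := by
      intro kw hkw; exact List.mem_map.mpr ⟨kw, hkw, rfl⟩
    have hLpos : 0 < L.length := by
      rw [hL]; simp [PySem.Chars.lower]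
      exact List.length_pos_of_ne_nil hT
    have hfind_le : ∀ (k : List Char) (m : Nat), k <+: L.drop m →
        0 ≤ PySem.Chars.find L k ∧ PySem.Chars.find L k ≤ (m : Int) := by
      intro k m hp
      have hinf : k <:+: L :=
        (PySem.Chars.isIn_iff_infix k L).mp
          ((PySem.Chars.exists_prefix_drop_iff_isIn k L).mp ⟨m, hp⟩)
      have h0 : 0 ≤ PySem.Chars.find L k := (PySem.Chars.find_nonneg_iff L k).mpr hinf
      obtain ⟨hpre, hminf⟩ := PySem.Chars.find_spec h0
      refine ⟨h0, ?_⟩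
      by_contra h
      exact hminf m (by omega) hp
    rcases hscan : pvScan kws L 0 with _ | m
    · have hind : indices = [] := by
        rw [pvScan_eq_none_iff] at hscan
        by_contra hne
        obtain ⟨x, hx⟩ := List.exists_mem_of_ne_nil _ hne
        obtain ⟨kw, hkw, h0, rfl⟩ := (hmem x).mp hx
        set k := PySem.Chars.lower kw.toList with hk
        obtain ⟨hpre, -⟩ := PySem.Chars.find_spec h0
        have hle := PySem.Chars.find_le_length L k
        by_cases hlt : (PySem.Chars.find L k).toNat < L.length
        · exact hscan _ hlt k (hkmem kw hkw) hpre
        · have : (PySem.Chars.find L k).toNat = L.length := by omega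
          rw [this, List.drop_length, List.prefix_nil] at hpre
          exact hscan 0 hLpos k (hkmem kw hkw) (by simp [hpre])
      simp [hind]
    · rw [pvScan_eq_some_iff] at hscan
      obtain ⟨j, hjlen, hmj, ⟨k1, hk1mem, hk1pre⟩, hminim⟩ := hscan
      obtain rfl : m = j := by omega
      obtain ⟨f1h0, f1le⟩ := hfind_le k1 m hk1pre
      obtain ⟨kw1, hkw1, rfl⟩ := List.mem_map.mp hk1mem
      have hf1mem : PySem.Chars.find L (PySem.Chars.lower kw1.toList) ∈ indices :=
        (hmem _).mpr ⟨kw1, hkw1, f1h0, rfl⟩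
      have hne : indices ≠ [] := List.ne_nil_of_mem hf1mem
      rcases hmin : PySem.List.min? indices (fun x => x) with _ | v
      · exact absurd ((PySem.List.min?_eq_none_iff indices _).mp hmin) hne
      · have hvmem := PySem.List.min?_mem hmin
        obtain ⟨kw0, hkw0, h0v, rfl⟩ := (hmem v).mp hvmem
        set k0 := PySem.Chars.lower kw0.toList with hk0
        obtain ⟨hpre0, -⟩ := PySem.Chars.find_spec h0v
        have hmlev : m ≤ (PySem.Chars.find L k0).toNat := by
          by_contra hlt
          exact hminim _ (by omega) k0 (hkmem kw0 hkw0) hpre0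
        have hvle : PySem.Chars.find L k0 ≤ (m : Int) :=
          le_trans (PySem.List.min?_isMin hmin _ hf1mem) f1le
        have hveq : PySem.Chars.find L k0 = (m : Int) := by omega
        rw [if_neg hne, hveq]
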